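-- pv_equiv track=rewrite | github.com/BetelgeuseBugFixer/PPI | utility/analyse_pfams.py | get_field_from_csv_line
-- ===== SOURCE A (Python) =====
-- def get_field_from_csv_line(line: str, field_index: int) -> str:
--     current_index = 0
--     in_right_field = current_index == field_index
--     in_quotation_mark = False
--     start = 0
--     for line_index, char in enumerate(line):
--         if char == '\"':
--             in_quotation_mark = not in_quotation_mark
--         elif not in_quotation_mark:
--             if char == ',':
--                 if in_right_field:
--                     return line[start: line_index].strip("\"")
--                 else:
--                     current_index += 1
--                     in_right_field = current_index == field_index
--                     if in_right_field:
--                         start = line_index + 1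
--     if in_right_field:
--         return line[start:].strip("\"")
--     raise RuntimeError
-- ===== SOURCE B (Python) =====
-- def get_field_from_csv_line(line: str, field_index: int) -> str:
--     # Parse the whole line into its fields in one pass, then select and validate.
--     fields = []
--     cur = []
--     in_quotation_mark = False
--     for char in line:
--         if char == '"':
--             in_quotation_mark = not in_quotation_mark
--             cur.append(char)
--         elif char == ',' and not in_quotation_mark:
--             fields.append(''.join(cur))
--             cur = []
--         else:
--             cur.append(char)
--     fields.append(''.join(cur))
--     if field_index < 0 or field_index >= len(fields):
--         raise RuntimeError
--     return fields[field_index].strip('"')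
-- ===== Notes on version B (the rewrite author's own statement) =====
-- stated objective: simpler
-- what changed: B parses the whole line into a list of all fields in one quote-aware pass and then selects/validates the index, replacing A's early-exit scan that tracks only the target field with slice bookkeeping (current_index/in_right_field/start).
import Mathlib
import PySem

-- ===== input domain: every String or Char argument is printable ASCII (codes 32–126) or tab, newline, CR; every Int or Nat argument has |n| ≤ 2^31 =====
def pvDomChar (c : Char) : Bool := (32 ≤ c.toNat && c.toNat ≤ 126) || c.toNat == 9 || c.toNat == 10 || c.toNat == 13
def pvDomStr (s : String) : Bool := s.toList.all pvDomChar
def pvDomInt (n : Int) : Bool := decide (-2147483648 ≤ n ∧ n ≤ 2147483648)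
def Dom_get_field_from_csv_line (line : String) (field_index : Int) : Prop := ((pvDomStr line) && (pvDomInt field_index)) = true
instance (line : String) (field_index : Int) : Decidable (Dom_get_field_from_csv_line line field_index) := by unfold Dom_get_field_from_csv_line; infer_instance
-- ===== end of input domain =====

-- B parses the whole line into its list of fields in one pass and then selects/validates
-- the index, instead of A's early-exit scan that tracks only the target field (objective: simpler).

-- ===== PORT A =====
-- A's for-loop over enumerate(line), as structural recursion over the remaining characters;
-- `line_index` mirrors the enumerate counter.  The invariant start ≤ line_index always holds,
-- so the Python slices line[start:line_index] / line[start:] are exactly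
-- (drop start).take (line_index - start) / drop start (nonnegative in-range bounds).
-- `none` = the final `raise RuntimeError`.
def aLoop (line : List Char) (rest : List Char) (line_index : Nat) (current_index : Int)
    (in_right : Bool) (q : Bool) (start : Nat) (target : Int) : Option (List Char) :=
  match rest with
  | [] => if in_right then some (PySem.Chars.stripChars (line.drop start) ['"']) else none
  | c :: r =>
    if c = '"' then aLoop line r (line_index + 1) current_index in_right (!q) start target
    else if q = false ∧ c = ',' then
      if in_right then
        some (PySem.Chars.stripChars ((line.drop start).take (line_index - start)) ['"'])
      else
        let ci := current_index + 1
        let ir : Bool := decide (ci = target)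
        aLoop line r (line_index + 1) ci ir q (if ir then line_index + 1 else start) target
    else aLoop line r (line_index + 1) current_index in_right q start target

def get_field_from_csv_line (line : String) (field_index : Int) : String :=
  -- the RuntimeError case (none) is excluded by Pre_; "" is a junk value there
  String.mk ((aLoop line.toList line.toList 0 0 (decide ((0 : Int) = field_index)) false 0 field_index).getD [])

-- ===== PORT B =====
-- Source B's single pass: accumulate the current field's characters in `cur`, flush to `fields`
-- at each comma outside quotes, flush the final field after the loop.
def bLoop (rest : List Char) (fields : List (List Char)) (cur : List Char) (q : Bool) :
    List (List Char) :=
  match rest with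
  | [] => fields ++ [cur]
  | c :: r =>
    if c = '"' then bLoop r fields (cur ++ [c]) (!q)
    else if c = ',' ∧ q = false then bLoop r (fields ++ [cur]) [] q
    else bLoop r fields (cur ++ [c]) q

def get_field_from_csv_line_alt (line : String) (field_index : Int) : String :=
  let fields := bLoop line.toList [] [] false
  -- Source B raises RuntimeError on an out-of-range index (excluded by Pre_); "" is a junk value there
  if field_index < 0 ∨ (fields.length : Int) ≤ field_index then ""
  else String.mk (PySem.Chars.stripChars (fields.getD field_index.toNat []) ['"'])

-- ===== PRECONDITION & SPEC =====
-- number of commas that lie outside double quotes (quote parity toggles on each '"')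
def commasOutside : List Char → Bool → Nat
  | [], _ => 0
  | c :: r, q =>
    if c = '"' then commasOutside r (!q)
    else if c = ',' ∧ q = false then commasOutside r q + 1
    else commasOutside r q

-- Pre_ holds exactly when field_index names one of the 1 + commasOutside fields of the line;
-- outside it both A and B raise RuntimeError.
def Pre_get_field_from_csv_line (line : String) (field_index : Int) : Prop :=
  0 ≤ field_index ∧ field_index < 1 + (commasOutside line.toList false : Int)

instance (line : String) (field_index : Int) : Decidable (Pre_get_field_from_csv_line line field_index) := by
  unfold Pre_get_field_from_csv_line; infer_instance

def pvWitness_get_field_from_csv_line : String × Int := ("ab,\"c,d\",e", 1)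

def Spec_get_field_from_csv_line (line : String) (field_index : Int) (out : String) : Prop := out = get_field_from_csv_line_alt line field_index
instance (line : String) (field_index : Int) (out : String) : Decidable (Spec_get_field_from_csv_line line field_index out) := by unfold Spec_get_field_from_csv_line; infer_instance

-- ===== CLAIM (what is proved, stated in full; the proofs are below) =====
def Claim_equal_get_field_from_csv_line : Prop := ∀ (line : String) (field_index : Int), Dom_get_field_from_csv_line line field_index → Pre_get_field_from_csv_line line field_index → Spec_get_field_from_csv_line line field_index (get_field_from_csv_line line field_index)

-- ===== LEMMAS AND PROOFS =====

-- reference splitter: the list of (quote-aware) fields of `rest`, starting in quote state q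
def consHd (c : Char) : List (List Char) → List (List Char)
  | [] => [[c]]
  | f :: fs => (c :: f) :: fs

def splitQ : List Char → Bool → List (List Char)
  | [], _ => [[]]
  | c :: r, q =>
    if c = '"' then consHd c (splitQ r (!q))
    else if c = ',' ∧ q = false then [] :: splitQ r q
    else consHd c (splitQ r q)

def headCat (pre : List Char) : List (List Char) → List (List Char)
  | [] => [pre]
  | f :: fs => (pre ++ f) :: fs

-- what aLoop computes: field (target - ci) of splitQ rest q, with the already-seen prefix
-- `pre` of the current field glued on when that relative index is 0
def sel (fs : List (List Char)) (k : Int) (pre : List Char) : Option (List Char) :=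
  if k < 0 then none
  else
    match fs[k.toNat]? with
    | none => none
    | some f => some (PySem.Chars.stripChars (if k = 0 then pre ++ f else f) ['"'])

theorem splitQ_ne_nil (l : List Char) (q : Bool) : splitQ l q ≠ [] := by
  cases l with
  | nil => simp [splitQ]
  | cons c r =>
    simp only [splitQ]
    split
    · cases splitQ r (!q) <;> simp [consHd]
    · split
      · simp
      · cases splitQ r q <;> simp [consHd]

theorem headCat_consHd (c : Char) (pre : List Char) (fs : List (List Char)) :
    headCat pre (consHd c fs) = headCat (pre ++ [c]) fs := by
  cases fs <;> simp [consHd, headCat]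

theorem headCat_nil (fs : List (List Char)) (h : fs ≠ []) : headCat [] fs = fs := by
  cases fs with
  | nil => exact absurd rfl h
  | cons f fs => simp [headCat]

theorem bLoop_eq (rest : List Char) : ∀ (fields : List (List Char)) (cur : List Char) (q : Bool),
    bLoop rest fields cur q = fields ++ headCat cur (splitQ rest q) := by
  induction rest with
  | nil => intro fields cur q; simp [bLoop, splitQ, headCat]
  | cons c r ih =>
    intro fields cur q
    by_cases hq : c = '"'
    · simp only [bLoop, splitQ, if_pos hq]
      rw [ih, headCat_consHd]
    · by_cases hcm : c = ',' ∧ q = false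
      · simp only [bLoop, splitQ, if_neg hq, if_pos hcm]
        rw [ih, headCat_nil _ (splitQ_ne_nil r q)]
        simp [headCat]
      · simp only [bLoop, splitQ, if_neg hq, if_neg hcm]
        rw [ih, headCat_consHd]

theorem sel_consHd (c : Char) (fs : List (List Char)) (k : Int) (pre : List Char)
    (hfs : fs ≠ []) : sel (consHd c fs) k pre = sel fs k (pre ++ [c]) := by
  cases fs with
  | nil => exact absurd rfl hfs
  | cons f fs' =>
    unfold sel consHd
    by_cases hk : k < 0
    · simp [hk]
    · by_cases h0 : k = 0
      · subst h0; simp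
      · have h1 : 1 ≤ k.toNat := by omega
        have h2 : k.toNat = (k.toNat - 1) + 1 := by omega
        rw [h2]
        simp [hk, h0]

theorem length_splitQ (l : List Char) : ∀ (q : Bool),
    (splitQ l q).length = commasOutside l q + 1 := by
  induction l with
  | nil => intro q; simp [splitQ, commasOutside]
  | cons c r ih =>
    intro q
    by_cases hq : c = '"'
    · simp only [splitQ, commasOutside, if_pos hq]
      cases hfs : splitQ r (!q) with
      | nil => exact absurd hfs (splitQ_ne_nil r (!q))
      | cons f fs => have h := ih (!q); rw [hfs] at h; simp [consHd, ← h]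
    · by_cases hcm : c = ',' ∧ q = false
      · have hcm' : q = false ∧ c = ',' := ⟨hcm.2, hcm.1⟩
        simp only [splitQ, commasOutside, if_neg hq, if_pos hcm]
        simp [ih q]
      · have hcm' : ¬ (q = false ∧ c = ',') := by tauto
        simp only [splitQ, commasOutside, if_neg hq, if_neg hcm]
        cases hfs : splitQ r q with
        | nil => exact absurd hfs (splitQ_ne_nil r q)
        | cons f fs => have h := ih q; rw [hfs] at h; simp [consHd, ← h]

theorem aLoop_eq (line : List Char) (target : Int) (rest : List Char) :
    ∀ (q : Bool) (pre : List Char) (ci : Int) (li start : Nat),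
    start ≤ li → line.drop start = pre ++ rest → li - start = pre.length →
    aLoop line rest li ci (decide (ci = target)) q start target =
      sel (splitQ rest q) (target - ci) pre := by
  induction rest with
  | nil =>
    intro q pre ci li start hsl hdrop hlen
    simp only [aLoop, splitQ, sel]
    rw [hdrop]
    simp only [List.append_nil]
    by_cases h : ci = target
    · subst h
      simp
    · by_cases hk : target - ci < 0
      · simp [h, hk]
      · have h1 : 1 ≤ (target - ci).toNat := by omega
        have h2 : (target - ci).toNat = ((target - ci).toNat - 1) + 1 := by omega
        rw [h2]
        simp [h, hk]
  | cons c r ih =>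
    intro q pre ci li start hsl hdrop hlen
    have hdropli : line.drop li = c :: r := by
      have h1 : line.drop li = (line.drop start).drop (li - start) := by
        rw [List.drop_drop]; congr 1; omega
      rw [h1, hdrop, hlen]; simp
    have hdropli1 : line.drop (li + 1) = r := by
      have h1 : line.drop (li + 1) = (line.drop li).drop 1 := by
        rw [List.drop_drop]
      rw [h1, hdropli]; rfl
    by_cases hq : c = '"'
    · -- quote
      simp only [aLoop, splitQ, if_pos hq]
      rw [ih (!q) (pre ++ [c]) ci (li + 1) start (by omega)
          (by rw [hdrop]; simp) (by simp; omega)]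
      rw [sel_consHd _ _ _ _ (splitQ_ne_nil r (!q))]
    · by_cases hcm : q = false ∧ c = ','
      · -- comma outside quotes
        simp only [aLoop, splitQ, if_neg hq, if_pos hcm, if_pos (And.intro hcm.2 hcm.1)]
        by_cases h : ci = target
        · subst h
          simp only [decide_true, if_true]
          have htake : (line.drop start).take (li - start) = pre := by
            rw [hdrop, hlen]; simp
          rw [htake]
          simp [sel]
        · simp only [decide_eq_false h, Bool.false_eq_true, if_false]
          by_cases h1 : ci + 1 = target
          · have hir : (decide (ci + 1 = target)) = true := by simp [h1]
            have IH := ih q [] (ci + 1) (li + 1) (li + 1) (by omega)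
              (by rw [hdropli1]; simp) (by simp)
            rw [hir] at IH
            simp only [hir, if_true]
            rw [IH]
            subst h1
            simp only [sel]
            have h2 : (ci + 1 - ci) = 1 := by omega
            rw [h2]
            norm_num
          · have hir : (decide (ci + 1 = target)) = false := by simp [h1]
            have IH := ih q (pre ++ [c]) (ci + 1) (li + 1) start (by omega)
              (by rw [hdrop]; simp) (by simp; omega)
            rw [hir] at IH
            simp only [hir, Bool.false_eq_true, if_false]
            rw [IH]
            unfold sel
            by_cases hneg : target - ci < 0
            · simp only [if_pos hneg, if_pos (by omega : target - (ci + 1) < 0)]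
            · have hk2 : 2 ≤ target - ci := by omega
              simp only [if_neg hneg, if_neg (by omega : ¬ target - (ci + 1) < 0)]
              have h3 : (target - ci).toNat = (target - (ci + 1)).toNat + 1 := by omega
              rw [h3]
              simp only [List.getElem?_cons_succ]
              have hne0 : ¬ (target - ci = 0) := by omega
              have hne0' : ¬ (target - (ci + 1) = 0) := by omega
              simp [hne0, hne0']
      · -- other character
        have hcm' : ¬ (c = ',' ∧ q = false) := by tauto
        simp only [aLoop, splitQ, if_neg hq, if_neg hcm, if_neg hcm']
        rw [ih q (pre ++ [c]) ci (li + 1) start (by omega)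
            (by rw [hdrop]; simp) (by simp; omega)]
        rw [sel_consHd _ _ _ _ (splitQ_ne_nil r q)]

-- ===== VERDICT (by name: the statement is the Claim_ definition above) =====
theorem get_field_from_csv_line_spec : Claim_equal_get_field_from_csv_line := by
  intro line field_index _ hpre
  obtain ⟨h0, hlt⟩ := hpre
  unfold Spec_get_field_from_csv_line get_field_from_csv_line get_field_from_csv_line_alt
  rw [aLoop_eq line.toList field_index line.toList false [] 0 0 0 (le_refl 0) (by simp) (by simp)]
  rw [bLoop_eq, headCat_nil _ (splitQ_ne_nil line.toList false)]
  simp only [List.nil_append]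
  have hlen : ((splitQ line.toList false).length : Int) = commasOutside line.toList false + 1 := by
    rw [length_splitQ]; push_cast; ring
  have hinb : ¬ (field_index < 0 ∨ ((splitQ line.toList false).length : Int) ≤ field_index) := by
    rw [hlen]; omega
  rw [if_neg hinb]
  unfold sel
  rw [if_neg (by omega : ¬ field_index - 0 < 0)]
  have hidx : (field_index - 0).toNat < (splitQ line.toList false).length := by
    have := hlen; omega
  cases hget : (splitQ line.toList false)[(field_index - 0).toNat]? with
  | none => rw [List.getElem?_eq_none_iff] at hget; omega
  | some f =>
    have hgetD : (splitQ line.toList false).getD field_index.toNat [] = f := by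
      have : field_index.toNat = (field_index - 0).toNat := by omega
      rw [this, List.getD_eq_getElem?_getD, hget]; rfl
    rw [hgetD]
    by_cases h0' : field_index - 0 = 0
    · simp
    · simp
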